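-- pv_equiv track=rewrite | github.com/emadsaberbahbah-coder/tadawul-fast | core/data_engine_v2.py | _extract_symbols_from_rows
-- ===== SOURCE A (Python) =====
-- from typing import Any, Dict, Iterable, List, Mapping, Optional, Sequence, Set, Tuple
--
-- def _safe_str(x: Any, default: str = "") -> str:
--     if x is None:
--         return default
--     try:
--         s = str(x).strip()
--         return s if s else default
--     except Exception:
--         return default
--
-- def normalize_symbol(symbol: str) -> str:
--     return _safe_str(symbol).upper()
--
-- def _normalize_symbol_list(symbols: Iterable[Any], limit: int = 5000) -> List[str]:
--     out: List[str] = []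
--     seen: Set[str] = set()
--     for item in symbols:
--         s = normalize_symbol(_safe_str(item))
--         if not s or s in seen:
--             continue
--         seen.add(s)
--         out.append(s)
--         if len(out) >= limit:
--             break
--     return out
--
-- def _extract_symbols_from_rows(rows: Sequence[Dict[str, Any]], limit: int = 5000) -> List[str]:
--     raw: List[str] = []
--     for row in rows or []:
--         if not isinstance(row, dict):
--             continue
--         for key in ("symbol", "ticker", "code", "requested_symbol", "Symbol", "Ticker", "Code"):
--             v = row.get(key)
--             if v:
--                 raw.append(str(v).strip())
--                 break
--     return _normalize_symbol_list(raw, limit=limit)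
-- ===== SOURCE B (Python) =====
-- _SYMBOL_KEYS = ("symbol", "ticker", "code", "requested_symbol", "Symbol", "Ticker", "Code")
--
-- def _extract_symbols_from_rows(rows, limit=5000):
--     out = []
--     seen = set()
--     for row in rows or []:
--         if not isinstance(row, dict):
--             continue
--         for key in _SYMBOL_KEYS:
--             v = row.get(key)
--             if v:
--                 s = str(v).strip().upper()
--                 if s and s not in seen:
--                     seen.add(s)
--                     out.append(s)
--                     if len(out) >= limit:
--                         return out
--                 break
--     return out
-- ===== Notes on version B (the rewrite author's own statement) =====
-- stated objective: simpler
-- what changed: B fuses A's two passes (build an intermediate raw list, then a separate normalize/dedup/limit pass through _safe_str/normalize_symbol/_normalize_symbol_list) into one loop over the rows that extracts, strips+uppercases, dedups and limits in place, with no intermediate list and no helper chain (strip is only applied once, using that strip is idempotent).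
import Mathlib
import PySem

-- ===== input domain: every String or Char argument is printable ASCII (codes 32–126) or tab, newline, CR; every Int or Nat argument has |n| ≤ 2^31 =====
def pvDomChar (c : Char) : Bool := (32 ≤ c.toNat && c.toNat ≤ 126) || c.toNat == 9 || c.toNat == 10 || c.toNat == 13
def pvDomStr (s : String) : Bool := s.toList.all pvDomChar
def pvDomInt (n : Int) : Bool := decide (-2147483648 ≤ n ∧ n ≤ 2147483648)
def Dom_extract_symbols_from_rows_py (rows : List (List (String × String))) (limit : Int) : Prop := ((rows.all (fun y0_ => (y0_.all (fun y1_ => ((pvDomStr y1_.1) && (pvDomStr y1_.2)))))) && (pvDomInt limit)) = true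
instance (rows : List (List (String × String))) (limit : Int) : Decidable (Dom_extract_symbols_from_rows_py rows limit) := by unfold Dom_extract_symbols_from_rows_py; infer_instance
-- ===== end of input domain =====

-- B fuses A's two passes (extract raw list, then normalize/dedup/limit) into one loop with no
-- intermediate list; objective: simpler (one short function instead of four).

-- ===== PORT A =====
-- the 7-key tuple of _extract_symbols_from_rows
def pvKeysA : List String := ["symbol", "ticker", "code", "requested_symbol", "Symbol", "Ticker", "Code"]

-- _safe_str for a str argument (x is never None here; str(x) is the identity and never raises; default "")
def pvSafeStr (x : String) : String :=
  if PySem.Str.strip x ≠ "" then PySem.Str.strip x else ""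

-- normalize_symbol
def pvNormalizeSymbol (symbol : String) : String :=
  PySem.Str.upper (pvSafeStr symbol)

-- the loop of _normalize_symbol_list (out/seen state, break once len(out) >= limit after an append)
def pvNormLoop (items : List String) (limit : Int) (seen : PySem.Set String) (out : List String) : List String :=
  match items with
  | [] => out
  | item :: rest =>
    let s := pvNormalizeSymbol (pvSafeStr item)
    if s = "" || PySem.Set.contains seen s then pvNormLoop rest limit seen out
    else
      let seen' := PySem.Set.add seen s
      let out' := out ++ [s]
      if (out'.length : Int) ≥ limit then out'
      else pvNormLoop rest limit seen' out'

-- the inner key loop of _extract_symbols_from_rows: first key whose value is truthy, str(v).strip() of it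
def pvRowRaw : List String → List (String × String) → Option String
  | [], _ => none
  | k :: ks, row =>
    match PySem.Dict.get? ⟨row⟩ k with
    | some v => if v ≠ "" then some (PySem.Str.strip v) else pvRowRaw ks row
    | none => pvRowRaw ks row

-- _extract_symbols_from_rows ('rows or []' is the identity on a list; every row is a dict here)
def extract_symbols_from_rows_py (rows : List (List (String × String))) (limit : Int) : List String :=
  let raw := rows.foldl (fun raw row =>
    match pvRowRaw pvKeysA row with
    | some s => raw ++ [s]
    | none => raw) []
  pvNormLoop raw limit PySem.Set.empty []

-- ===== PORT B =====
-- _SYMBOL_KEYS of Source B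
def pvKeysB : List String := ["symbol", "ticker", "code", "requested_symbol", "Symbol", "Ticker", "Code"]

-- the inner key loop of B: first key whose value is truthy, the value itself
def pvAltFirst : List String → List (String × String) → Option String
  | [], _ => none
  | k :: ks, row =>
    match PySem.Dict.get? ⟨row⟩ k with
    | some v => if v ≠ "" then some v else pvAltFirst ks row
    | none => pvAltFirst ks row

-- B's single fused loop over the rows
def pvAltGo (rows : List (List (String × String))) (limit : Int) (seen : PySem.Set String) (out : List String) : List String :=
  match rows with
  | [] => out
  | row :: rest =>
    match pvAltFirst pvKeysB row with
    | none => pvAltGo rest limit seen out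
    | some v =>
      let s := PySem.Str.upper (PySem.Str.strip v)
      if s ≠ "" && !(PySem.Set.contains seen s) then
        let out' := out ++ [s]
        if (out'.length : Int) ≥ limit then out'
        else pvAltGo rest limit (PySem.Set.add seen s) out'
      else pvAltGo rest limit seen out

def extract_symbols_from_rows_py_alt (rows : List (List (String × String))) (limit : Int) : List String :=
  pvAltGo rows limit PySem.Set.empty []

-- ===== PRECONDITION & SPEC =====
def Spec_extract_symbols_from_rows_py (rows : List (List (String × String))) (limit : Int) (out : List String) : Prop := out = extract_symbols_from_rows_py_alt rows limit
instance (rows : List (List (String × String))) (limit : Int) (out : List String) : Decidable (Spec_extract_symbols_from_rows_py rows limit out) := by unfold Spec_extract_symbols_from_rows_py; infer_instance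

-- ===== CLAIM (what is proved, stated in full; the proofs are below) =====
def Claim_equal_extract_symbols_from_rows_py : Prop := ∀ (rows : List (List (String × String))) (limit : Int), Dom_extract_symbols_from_rows_py rows limit → Spec_extract_symbols_from_rows_py rows limit (extract_symbols_from_rows_py rows limit)

-- ===== LEMMAS AND PROOFS =====

-- Python's strip is idempotent
lemma pv_strip_core (p : Char → Bool) (a : List Char) (ha : a.dropWhile p = a) :
    ((((a.reverse.dropWhile p).reverse.dropWhile p).reverse.dropWhile p).reverse)
      = (a.reverse.dropWhile p).reverse := by
  set z := (a.reverse.dropWhile p).reverse with hz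
  have hzrev : z.reverse = a.reverse.dropWhile p := by rw [hz, List.reverse_reverse]
  have hpref : z <+: a := by
    rw [← List.reverse_suffix, hzrev]
    exact List.dropWhile_suffix p
  have hzdrop : z.dropWhile p = z := by
    rcases hzc : z with _ | ⟨c, zs⟩
    · simp
    · obtain ⟨t, hta⟩ := hpref
      rw [hzc, List.cons_append] at hta
      rw [← hta] at ha
      have hpc : ¬ p c = true := by
        intro hcc
        rw [List.dropWhile_cons_of_pos hcc] at ha
        have hlen := List.length_dropWhile_le p (zs ++ t)
        rw [ha] at hlen
        simp at hlen
      rw [List.dropWhile_cons_of_neg hpc]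
  rw [hzdrop, hzrev, List.dropWhile_idempotent]

lemma pvChars_strip_idem (cs : List Char) :
    PySem.Chars.strip (PySem.Chars.strip cs) = PySem.Chars.strip cs := by
  unfold PySem.Chars.strip PySem.Chars.lstrip PySem.Chars.rstrip
  exact pv_strip_core PySem.Chars.isspace (cs.dropWhile PySem.Chars.isspace)
    (List.dropWhile_idempotent _ _)

lemma pvStr_strip_idem (s : String) :
    PySem.Str.strip (PySem.Str.strip s) = PySem.Str.strip s := by
  simp [PySem.Str.strip, String.toList_ofList, pvChars_strip_idem]

-- _safe_str on a string is just strip (both branches return strip x)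
lemma pvSafeStr_eq_strip (x : String) : pvSafeStr x = PySem.Str.strip x := by
  unfold pvSafeStr
  split_ifs with h
  · rfl
  · simp only [ne_eq, not_not] at h
    exact h.symm

-- the normalization A applies to an already-stripped raw entry is B's s
lemma pvNorm_of_stripped (v : String) :
    pvNormalizeSymbol (pvSafeStr (PySem.Str.strip v)) = PySem.Str.upper (PySem.Str.strip v) := by
  unfold pvNormalizeSymbol
  rw [pvSafeStr_eq_strip, pvSafeStr_eq_strip, pvStr_strip_idem, pvStr_strip_idem]

-- A's raw entry for a row is B's first truthy value, stripped
lemma pvRowRaw_eq_altFirst (ks : List String) (row : List (String × String)) :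
    pvRowRaw ks row = (pvAltFirst ks row).map PySem.Str.strip := by
  induction ks with
  | nil => simp [pvRowRaw, pvAltFirst]
  | cons k ks ih =>
    simp only [pvRowRaw, pvAltFirst]
    cases PySem.Dict.get? ⟨row⟩ k with
    | none => exact ih
    | some v =>
      by_cases hv : v = ""
      · simp [hv, ih]
      · simp [hv]

-- A's raw-building foldl is an append of the per-row entries
lemma pvRaw_foldl (rows : List (List (String × String))) (acc : List String) :
    rows.foldl (fun raw row =>
      match pvRowRaw pvKeysA row with
      | some s => raw ++ [s]
      | none => raw) acc
    = acc ++ rows.filterMap (fun row => pvRowRaw pvKeysA row) := by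
  induction rows generalizing acc with
  | nil => simp
  | cons row rest ih =>
    simp only [List.foldl_cons, List.filterMap_cons]
    cases h : pvRowRaw pvKeysA row with
    | none => simp [ih]
    | some s => simp [ih]

-- the fused loop of B computes A's normalize-loop applied to A's raw list, for every state
lemma pvNormLoop_eq_altGo (rows : List (List (String × String))) (limit : Int)
    (seen : PySem.Set String) (out : List String) :
    pvNormLoop (rows.filterMap (fun row => pvRowRaw pvKeysA row)) limit seen out
    = pvAltGo rows limit seen out := by
  induction rows generalizing seen out with
  | nil => rfl
  | cons row rest ih =>
    simp only [List.filterMap_cons, pvAltGo]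
    have hkeys : pvKeysB = pvKeysA := rfl
    rw [hkeys, pvRowRaw_eq_altFirst]
    cases h : pvAltFirst pvKeysA row with
    | none => simpa using ih seen out
    | some v =>
      simp only [Option.map_some]
      simp only [pvNormLoop, pvNorm_of_stripped]
      by_cases hs : PySem.Str.upper (PySem.Str.strip v) = ""
      · simp [hs, ih]
      · by_cases hm : PySem.Set.contains seen (PySem.Str.upper (PySem.Str.strip v)) = true
        · simp [hs, ih]
        · simp only [hs, hm]
          simp only [Bool.not_eq_true] at hm
          simp [hs, ih]

-- ===== VERDICT (by name: the statement is the Claim_ definition above) =====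
theorem extract_symbols_from_rows_py_spec : Claim_equal_extract_symbols_from_rows_py := by
  intro rows limit _
  show extract_symbols_from_rows_py rows limit = extract_symbols_from_rows_py_alt rows limit
  unfold extract_symbols_from_rows_py extract_symbols_from_rows_py_alt
  rw [pvRaw_foldl, List.nil_append, pvNormLoop_eq_altGo]
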